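-- pv_equiv track=rewrite | github.com/hhssmm95/ProblemSolving | Programmers/python_src/the_best_set.py | solution
-- ===== SOURCE A (Python) =====
-- def solution(n, s):
--     answer = []
--
--     num = s//n
--     rest = s%n
--
--     if s < n:
--         return [-1]
--
--     for i in range(n):
--         if i >= n - rest:
--             answer.append(num+1)
--         else:
--             answer.append(num)
--
--     return answer
-- ===== SOURCE B (Python) =====
-- def solution(n, s):
--     if s < n:
--         return [-1]
--     answer = []
--     remaining = s
--     k = n
--     while k > 0:
--         q = remaining // k
--         answer.append(q)
--         remaining -= q
--         k -= 1
--     return answer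
-- ===== Notes on version B (the rewrite author's own statement) =====
-- stated objective: alternative
-- what changed: Greedy single pass over the remaining sum: each element is remaining//remaining_slots and is subtracted off before the next step, instead of A's precomputed quotient/remainder with a per-index threshold comparison.
import Mathlib
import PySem

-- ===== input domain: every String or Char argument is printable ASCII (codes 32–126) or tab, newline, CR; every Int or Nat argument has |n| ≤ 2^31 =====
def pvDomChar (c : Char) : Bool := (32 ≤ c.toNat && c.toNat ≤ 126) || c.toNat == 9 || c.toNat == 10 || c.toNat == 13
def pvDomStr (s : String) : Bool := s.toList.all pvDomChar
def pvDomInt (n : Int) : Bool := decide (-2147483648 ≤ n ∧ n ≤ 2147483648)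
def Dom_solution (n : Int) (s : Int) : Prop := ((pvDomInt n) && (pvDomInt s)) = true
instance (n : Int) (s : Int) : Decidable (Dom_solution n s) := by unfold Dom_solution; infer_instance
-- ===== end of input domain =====

-- B replaces A's precomputed quotient/remainder + per-index threshold loop by a greedy single
-- pass that gives each slot remaining//remaining_slots and subtracts it off (alternative, same cost).

-- ===== PORT A =====
def solution (n : Int) (s : Int) : List Int :=
  let num := PySem.Int.floordiv s n
  let rest := PySem.Int.mod s n
  if s < n then [-1]
  else
    (PySem.List.pyRange 0 n 1).foldl
      (fun answer i => if i ≥ n - rest then answer ++ [num + 1] else answer ++ [num]) []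

-- ===== PORT B =====
-- the while loop over k = n, n-1, …, 1; k.toNat counts the remaining iterations
def altGo : Nat → Int → List Int
  | 0, _ => []
  | k + 1, remaining =>
      let q := PySem.Int.floordiv remaining ((k : Int) + 1)
      q :: altGo k (remaining - q)

def solution_alt (n : Int) (s : Int) : List Int :=
  if s < n then [-1] else altGo n.toNat s

-- ===== PRECONDITION & SPEC =====
-- Pre_ excludes exactly n = 0, where Python's s//n in A raises ZeroDivisionError.
def Pre_solution (n : Int) (s : Int) : Prop := n ≠ 0
instance (n : Int) (s : Int) : Decidable (Pre_solution n s) := by unfold Pre_solution; infer_instance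
def pvWitness_solution : Int × Int := (3, 9)

def Spec_solution (n : Int) (s : Int) (out : List Int) : Prop := out = solution_alt n s
instance (n : Int) (s : Int) (out : List Int) : Decidable (Spec_solution n s out) := by unfold Spec_solution; infer_instance

-- ===== CLAIM =====
def Claim_equal_solution : Prop := ∀ (n : Int) (s : Int), Dom_solution n s → Pre_solution n s → Spec_solution n s (solution n s)
-- ===== LEMMAS AND PROOFS =====

-- A's loop over range(n) with threshold m = n - rest equals the two replicated blocks.
theorem loop_eq_blocks (n m x y : Int) (h0 : 0 ≤ m) (hm : m ≤ n) :
    (PySem.List.pyRange 0 n 1).foldl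
      (fun answer i => if i ≥ m then answer ++ [x] else answer ++ [y]) []
      = List.replicate m.toNat y ++ List.replicate (n - m).toNat x := by
  have hsplit := PySem.List.pyRange_one_append 0 m n h0 hm
  rw [hsplit, List.foldl_append]
  have step : ∀ (l : List Int) (acc : List Int),
      l.foldl (fun answer i => if i ≥ m then answer ++ [x] else answer ++ [y]) acc
        = acc ++ l.map (fun i => if i ≥ m then x else y) := by
    intro l
    induction l with
    | nil => intro acc; simp
    | cons a t ih => intro acc; simp [List.foldl_cons, ih]; split <;> simp
  rw [step, step, List.nil_append]
  have h1 : (PySem.List.pyRange 0 m 1).map (fun i => if i ≥ m then x else y)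
      = List.replicate m.toNat y := by
    rw [List.map_congr_left (g := fun _ => y) ?_, List.map_const',
        PySem.List.length_pyRange_one]
    · norm_num
    · intro i hi
      rw [PySem.List.mem_pyRange_one] at hi
      simp [not_le.mpr hi.2]
  have h2 : (PySem.List.pyRange m n 1).map (fun i => if i ≥ m then x else y)
      = List.replicate (n - m).toNat x := by
    rw [List.map_congr_left (g := fun _ => x) ?_, List.map_const',
        PySem.List.length_pyRange_one]
    · intro i hi
      rw [PySem.List.mem_pyRange_one] at hi
      simp [hi.1]
  rw [h1, h2]

-- B's greedy loop produces the same two replicated blocks.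
theorem altGo_eq_blocks : ∀ (k : Nat) (s : Int), 0 < k →
    altGo k s = List.replicate (k - (PySem.Int.mod s (k : Int)).toNat) (PySem.Int.floordiv s (k : Int))
              ++ List.replicate (PySem.Int.mod s (k : Int)).toNat (PySem.Int.floordiv s (k : Int) + 1) := by
  intro k
  induction k with
  | zero => intro s h; omega
  | succ m ih =>
    intro s _
    have hcast : ((m + 1 : Nat) : Int) = (m : Int) + 1 := by push_cast; ring
    rw [hcast]
    set q := PySem.Int.floordiv s ((m : Int) + 1) with hq
    set r := PySem.Int.mod s ((m : Int) + 1) with hr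
    have hpos : (0 : Int) < (m : Int) + 1 := by positivity
    have hsum : q * ((m : Int) + 1) + r = s := PySem.Int.floordiv_mul_add_mod s ((m : Int) + 1)
    have hr0 : 0 ≤ r := PySem.Int.mod_nonneg s hpos
    have hrlt : r < (m : Int) + 1 := PySem.Int.mod_lt s hpos
    have hrw : altGo (m + 1) s = q :: altGo m (s - q) := by
      simp only [altGo]; rw [hq]
    rw [hrw]
    rcases Nat.eq_zero_or_pos m with hm0 | hmpos
    · subst hm0
      have h1 : r = 0 := by omega
      have h2 : q = s := by omega
      simp [altGo, h1, h2]
    · have hmpos' : (0 : Int) < (m : Int) := by exact_mod_cast hmpos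
      by_cases hcase : r < (m : Int)
      · -- remaining quotient stays q, remainder stays r
        have hfd : PySem.Int.floordiv (s - q) (m : Int) = q := by
          rw [PySem.Int.floordiv_eq_iff_of_pos hmpos']
          constructor <;> nlinarith
        have hmd : PySem.Int.mod (s - q) (m : Int) = r := by
          have := PySem.Int.floordiv_mul_add_mod (s - q) (m : Int)
          rw [hfd] at this; linarith
        rw [ih (s - q) hmpos, hfd, hmd,
            show (m + 1) - r.toNat = ((m - r.toNat) + 1) from by omega,
            List.replicate_succ, List.cons_append]
      · -- r = m: remaining quotient becomes q + 1, remainder 0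
        have hrm : r = (m : Int) := by omega
        have hfd : PySem.Int.floordiv (s - q) (m : Int) = q + 1 := by
          rw [PySem.Int.floordiv_eq_iff_of_pos hmpos']
          constructor <;> nlinarith
        have hmd : PySem.Int.mod (s - q) (m : Int) = 0 := by
          have := PySem.Int.floordiv_mul_add_mod (s - q) (m : Int)
          rw [hfd] at this; nlinarith
        rw [ih (s - q) hmpos, hfd, hmd,
            show r.toNat = m from by omega,
            show (m + 1) - m = 1 from by omega]
        simp [List.replicate_succ]

-- ===== VERDICT =====
theorem solution_spec : Claim_equal_solution := by
  intro n s _ hn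
  unfold Pre_solution at hn
  unfold Spec_solution solution solution_alt
  simp only []
  set num := PySem.Int.floordiv s n with hnum
  set rest := PySem.Int.mod s n with hrest
  by_cases hs : s < n
  · simp [hs]
  · simp only [hs, if_false]
    by_cases hpos : 0 < n
    · have h0 : 0 ≤ rest := PySem.Int.mod_nonneg s hpos
      have hlt : rest < n := PySem.Int.mod_lt s hpos
      have hA := loop_eq_blocks n (n - rest) (num + 1) num (by omega) (by omega)
      rw [hA, show n - (n - rest) = rest from by ring]
      have hcast : ((n.toNat : Nat) : Int) = n := by omega
      have hB := altGo_eq_blocks n.toNat s (by omega)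
      rw [hcast, ← hnum, ← hrest] at hB
      rw [hB, show (n - rest).toNat = n.toNat - rest.toNat from by omega]
    · -- n < 0: A's range is empty and B's loop count n.toNat is 0
      have hneg : n < 0 := by omega
      rw [PySem.List.pyRange_one_eq_nil (by omega), show n.toNat = 0 from by omega]
      rfl
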